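-- pv_equiv track=rewrite | github.com/EconForge/splines.jl | src/gen_csplines.py | print_expr
-- ===== SOURCE A (Python) =====
-- def print_expr(symbs, inds=[]):
--     if len(symbs) == 0:
--         return 'C[{}]'.format(str.join(',',['i{}+{}'.format(i,k) for i,k in enumerate(inds)]))
--     else:
--         h = symbs[0]
--         q = symbs[1:]
--         exprs = [  '{}_{}*({})'.format(h,i,print_expr(q,inds + [i])) for i in range(4)]
--         return str.join( ' + ', exprs )
-- ===== SOURCE B (Python) =====
-- def print_expr(symbs, inds=[]):
--     # Bottom-up table build: enumerate all full index paths, render the leaves,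
--     # then repeatedly collapse groups of four from the innermost symbol outward.
--     paths = [list(inds)]
--     for _ in symbs:
--         paths = [p + [i] for p in paths for i in range(4)]
--     exprs = ['C[{}]'.format(','.join('i{}+{}'.format(j, k) for j, k in enumerate(p)))
--              for p in paths]
--     for sym in reversed(symbs):
--         grouped = []
--         buf = []
--         for e in exprs:
--             buf.append(e)
--             if len(buf) == 4:
--                 grouped.append(' + '.join('{}_{}*({})'.format(sym, i, x)
--                                           for i, x in enumerate(buf)))
--                 buf = []
--         exprs = grouped
--     return exprs[0]
-- ===== Notes on version B (the rewrite author's own statement) =====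
-- stated objective: alternative
-- what changed: Top-down recursion replaced by an explicit bottom-up table build: all 4^m leaf paths are enumerated first, their leaf strings rendered, then the table is collapsed in groups of four per symbol from the innermost level outward.
import Mathlib
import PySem

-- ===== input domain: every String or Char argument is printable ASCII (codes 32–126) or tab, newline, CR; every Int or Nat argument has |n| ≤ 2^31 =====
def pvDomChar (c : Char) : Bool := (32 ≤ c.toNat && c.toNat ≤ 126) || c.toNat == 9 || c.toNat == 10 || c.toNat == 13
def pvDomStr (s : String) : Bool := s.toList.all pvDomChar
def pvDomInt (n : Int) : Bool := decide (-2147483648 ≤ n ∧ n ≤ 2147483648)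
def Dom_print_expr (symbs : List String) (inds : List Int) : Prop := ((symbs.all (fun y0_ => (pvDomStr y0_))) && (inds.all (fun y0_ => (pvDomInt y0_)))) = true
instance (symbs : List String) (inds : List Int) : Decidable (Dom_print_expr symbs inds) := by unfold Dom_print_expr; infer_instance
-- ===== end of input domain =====

-- B replaces A's top-down recursion by a bottom-up table build (same output, same cost).

-- ===== PORT A =====
def print_expr (symbs : List String) (inds : List Int) : String :=
  match symbs with
  | [] =>
      "C[" ++ PySem.Str.join "," ((PySem.List.enumerate inds).map
        (fun ik => "i" ++ PySem.Int.toStr ik.1 ++ "+" ++ PySem.Int.toStr ik.2)) ++ "]"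
  | h :: q =>
      let exprs := (PySem.List.pyRange 0 4 1).map
        (fun i => h ++ "_" ++ PySem.Int.toStr i ++ "*(" ++ print_expr q (inds ++ [i]) ++ ")")
      PySem.Str.join " + " exprs

-- ===== PORT B =====
-- paths = [p + [i] for p in paths for i in range(4)]
def pvStepPaths (ps : List (List Int)) : List (List Int) :=
  ps.flatMap (fun p => (PySem.List.pyRange 0 4 1).map (fun i => p ++ [i]))

-- 'C[{}]'.format(','.join('i{}+{}'.format(j, k) for j, k in enumerate(p)))
def pvLeaf (p : List Int) : String :=
  "C[" ++ PySem.Str.join "," ((PySem.List.enumerate p).map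
    (fun jk => "i" ++ PySem.Int.toStr jk.1 ++ "+" ++ PySem.Int.toStr jk.2)) ++ "]"

-- the inner buffered collapse loop: one fold step per expression string
def pvStep (sym : String) (st : List String × List String) (e : String) : List String × List String :=
  let buf := st.2 ++ [e]
  if buf.length == 4 then
    (st.1 ++ [PySem.Str.join " + " ((PySem.List.enumerate buf).map
      (fun ie => sym ++ "_" ++ PySem.Int.toStr ie.1 ++ "*(" ++ ie.2 ++ ")"))], [])
  else
    (st.1, buf)

-- one level of the collapse: fold the buffer step over the level's expressions
def pvChunkJoin (sym : String) (es : List String) : List String :=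
  (es.foldl (pvStep sym) ([], [])).1

def print_expr_alt (symbs : List String) (inds : List Int) : String :=
  let paths := symbs.foldl (fun ps _ => pvStepPaths ps) [inds]
  let exprs0 := paths.map pvLeaf
  let exprs := symbs.reverse.foldl (fun es sym => pvChunkJoin sym es) exprs0
  -- exprs[0]; exprs is never empty (4^m ≥ 1 entries collapse to one)
  (PySem.List.pyGet? exprs 0).getD ""

-- ===== PRECONDITION & SPEC =====
def Spec_print_expr (symbs : List String) (inds : List Int) (out : String) : Prop := out = print_expr_alt symbs inds
instance (symbs : List String) (inds : List Int) (out : String) : Decidable (Spec_print_expr symbs inds out) := by unfold Spec_print_expr; infer_instance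

-- ===== CLAIM (what is proved, stated in full; the proofs are below) =====
def Claim_equal_print_expr : Prop := ∀ (symbs : List String) (inds : List Int), Dom_print_expr symbs inds → Spec_print_expr symbs inds (print_expr symbs inds)

-- ===== LEMMAS AND PROOFS =====

theorem pvPyRange4 : PySem.List.pyRange 0 4 1 = [0, 1, 2, 3] := by decide

theorem pvStepFour (sym : String) (acc : List String) (a b c d : String) :
    pvStep sym (pvStep sym (pvStep sym (pvStep sym (acc, []) a) b) c) d =
      (acc ++ [PySem.Str.join " + " ((PySem.List.enumerate [a, b, c, d]).map
        (fun ie => sym ++ "_" ++ PySem.Int.toStr ie.1 ++ "*(" ++ ie.2 ++ ")"))], []) := by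
  simp [pvStep]

theorem pvChunkFoldAux (sym : String) (g : List Int → String) : ∀ (ps : List (List Int)) (acc : List String),
    ((pvStepPaths ps).map g).foldl (pvStep sym) (acc, []) =
      (acc ++ ps.map (fun p => PySem.Str.join " + " ((PySem.List.pyRange 0 4 1).map
        (fun i => sym ++ "_" ++ PySem.Int.toStr i ++ "*(" ++ g (p ++ [i]) ++ ")"))), []) := by
  intro ps
  induction ps with
  | nil => intro acc; simp [pvStepPaths]
  | cons p ps ih =>
      intro acc
      have h1 : (pvStepPaths (p :: ps)).map g =
          [g (p ++ [0]), g (p ++ [1]), g (p ++ [2]), g (p ++ [3])] ++ (pvStepPaths ps).map g := by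
        simp [pvStepPaths, pvPyRange4]
      rw [h1, List.foldl_append]
      simp only [List.foldl_cons, List.foldl_nil]
      rw [pvStepFour, ih]
      simp [pvPyRange4, PySem.List.enumerate_cons, PySem.List.enumerate_nil]

theorem pvChunk (sym : String) (g : List Int → String) (ps : List (List Int)) :
    pvChunkJoin sym ((pvStepPaths ps).map g) =
      ps.map (fun p => PySem.Str.join " + " ((PySem.List.pyRange 0 4 1).map
        (fun i => sym ++ "_" ++ PySem.Int.toStr i ++ "*(" ++ g (p ++ [i]) ++ ")"))) := by
  unfold pvChunkJoin
  rw [pvChunkFoldAux]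
  simp

theorem pvMain (symbs : List String) : ∀ (ps : List (List Int)),
    symbs.reverse.foldl (fun es sym => pvChunkJoin sym es)
      ((symbs.foldl (fun a _ => pvStepPaths a) ps).map pvLeaf)
    = ps.map (fun p => print_expr symbs p) := by
  induction symbs with
  | nil =>
      intro ps
      simp only [List.reverse_nil, List.foldl_nil]
      apply List.map_congr_left
      intro p _
      rw [print_expr, pvLeaf]
  | cons h q ih =>
      intro ps
      have hrev : (h :: q).reverse = q.reverse ++ [h] := by simp
      have hfold : (h :: q).foldl (fun a _ => pvStepPaths a) ps =
          q.foldl (fun a _ => pvStepPaths a) (pvStepPaths ps) := rfl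
      rw [hrev, hfold, List.foldl_append, ih (pvStepPaths ps)]
      simp only [List.foldl_cons, List.foldl_nil]
      rw [pvChunk]
      apply List.map_congr_left
      intro p _
      rw [print_expr]

-- ===== VERDICT (by name: the statement is the Claim_ definition above) =====
theorem pvAltEq (symbs : List String) (inds : List Int) :
    print_expr_alt symbs inds = print_expr symbs inds := by
  show (PySem.List.pyGet? (symbs.reverse.foldl (fun es sym => pvChunkJoin sym es)
      ((symbs.foldl (fun ps _ => pvStepPaths ps) [inds]).map pvLeaf)) 0).getD "" = _
  rw [pvMain symbs [inds]]
  simp [PySem.List.pyGet?, PySem.List.pyIdx?]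

theorem print_expr_spec : Claim_equal_print_expr := by
  intro symbs inds _
  exact (pvAltEq symbs inds).symm
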